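-- pv_equiv track=rewrite | github.com/rookinc/xalchemy_lab | g900/scripts/g15_hamiltonian_cycle_structure_scan.py | max_outer_run
-- ===== SOURCE A (Python) =====
-- def vertex_kind(v: str) -> str:
--     return v[0]
--
-- def max_outer_run(cycle: list[str]) -> int:
--     cyc = cycle[:-1]
--     doubled = cyc + cyc
--     best = 0
--     cur = 0
--     for v in doubled:
--         if vertex_kind(v) == "o":
--             cur += 1
--             best = max(best, cur)
--         else:
--             cur = 0
--     return min(best, len(cyc))
-- ===== SOURCE B (Python) =====
-- def max_outer_run(cycle: list[str]) -> int:
--     # One pass over cycle[:-1] tracking the best linear run; the trailing run is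
--     # the final `cur`, the leading run is read off separately; the wrap-around
--     # candidate is trailing + leading.
--     cyc = cycle[:-1]
--     n = len(cyc)
--     best = 0
--     cur = 0
--     for v in cyc:
--         if v[0] == "o":
--             cur += 1
--             if cur > best:
--                 best = cur
--         else:
--             cur = 0
--     lead = 0
--     for v in cyc:
--         if v[0] == "o":
--             lead += 1
--         else:
--             break
--     return min(max(best, cur + lead), n)
-- ===== Notes on version B (the rewrite author's own statement) =====
-- stated objective: faster
-- what changed: B scans cycle[:-1] once (best linear run; trailing run falls out as the final counter) plus a short leading-run scan and combines trailing+leading for the wrap-around candidate, instead of A's scan over the doubled list cyc+cyc.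
import Mathlib
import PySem

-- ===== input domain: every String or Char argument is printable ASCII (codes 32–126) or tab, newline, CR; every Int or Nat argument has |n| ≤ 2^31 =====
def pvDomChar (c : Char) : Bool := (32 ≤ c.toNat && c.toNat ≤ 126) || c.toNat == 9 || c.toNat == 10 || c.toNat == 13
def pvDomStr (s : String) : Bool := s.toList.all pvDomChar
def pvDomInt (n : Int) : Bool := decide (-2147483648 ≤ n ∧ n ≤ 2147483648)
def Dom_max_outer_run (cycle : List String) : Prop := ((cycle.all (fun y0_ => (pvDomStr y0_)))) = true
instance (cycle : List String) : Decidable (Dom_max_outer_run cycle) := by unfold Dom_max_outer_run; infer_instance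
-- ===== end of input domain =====

-- B replaces A's scan of the doubled list cyc+cyc by a single pass over cyc plus a
-- leading-run scan, combining trailing+leading for the wrap-around candidate (objective: faster, constant factor).

-- ===== PORT A =====
def vertex_kind (v : String) : String :=
  match PySem.Str.pyGet? v 0 with
  | some c => String.ofList [c]
  | none => ""   -- v[0] raises IndexError on the empty string; excluded by Pre_

def pvStepA (s : Int × Int) (v : String) : Int × Int :=
  if vertex_kind v == "o" then (max s.1 (s.2 + 1), s.2 + 1) else (s.1, 0)

def max_outer_run (cycle : List String) : Int :=
  let cyc := PySem.List.slice cycle none (some (-1))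
  let doubled := cyc ++ cyc
  let r := doubled.foldl pvStepA (0, 0)
  min r.1 (cyc.length : Int)

-- ===== PORT B =====
def pvStepB (s : Int × Int) (v : String) : Int × Int :=
  if PySem.Str.pyGet? v 0 == some 'o' then
    (if s.2 + 1 > s.1 then s.2 + 1 else s.1, s.2 + 1)
  else (s.1, 0)

def pvLead : List String → Int
  | [] => 0
  | v :: vs => if PySem.Str.pyGet? v 0 == some 'o' then 1 + pvLead vs else 0

def max_outer_run_alt (cycle : List String) : Int :=
  let cyc := PySem.List.slice cycle none (some (-1))
  let n : Int := cyc.length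
  let r := cyc.foldl pvStepB (0, 0)   -- r.1 = best linear run, r.2 = trailing run
  min (max r.1 (r.2 + pvLead cyc)) n

-- ===== PRECONDITION & SPEC =====
-- Pre_ excludes lists whose element other than the last is the empty string: there
-- Python's v[0] raises IndexError in both A and B.
def Pre_max_outer_run (cycle : List String) : Prop := ∀ v ∈ cycle.dropLast, v ≠ ""
instance (cycle : List String) : Decidable (Pre_max_outer_run cycle) := by unfold Pre_max_outer_run; infer_instance
def pvWitness_max_outer_run : List String := ["oa", "x", "ob", "z"]
def Spec_max_outer_run (cycle : List String) (out : Int) : Prop := out = max_outer_run_alt cycle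
instance (cycle : List String) (out : Int) : Decidable (Spec_max_outer_run cycle out) := by unfold Spec_max_outer_run; infer_instance

-- ===== CLAIM (what is proved, stated in full; the proofs are below) =====
def Claim_equal_max_outer_run : Prop := ∀ (cycle : List String), Dom_max_outer_run cycle → Pre_max_outer_run cycle → Spec_max_outer_run cycle (max_outer_run cycle)

-- ===== LEMMAS AND PROOFS =====

-- best run value reachable in x when a run of length c is already open
def pvR (c : Int) : List String → Int
  | [] => 0
  | v :: xs => if PySem.Str.pyGet? v 0 == some 'o' then max (c + 1) (pvR (c + 1) xs) else pvR 0 xs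

-- trailing run length of x when a run of length c is already open
def pvT (c : Int) : List String → Int
  | [] => c
  | v :: xs => if PySem.Str.pyGet? v 0 == some 'o' then pvT (c + 1) xs else pvT 0 xs

theorem pvKind_eq (v : String) : (vertex_kind v == "o") = (PySem.Str.pyGet? v 0 == some 'o') := by
  unfold vertex_kind
  cases h : PySem.Str.pyGet? v 0 with
  | none => simp
  | some c => simp [String.ext_iff]

theorem pvStepA_eq : pvStepA = pvStepB := by
  funext s v
  simp only [pvStepA, pvStepB, pvKind_eq]
  split_ifs with h h2
  · exact congrArg₂ Prod.mk (by omega) rfl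
  · exact congrArg₂ Prod.mk (by omega) rfl
  · rfl

theorem pvR_nonneg (x : List String) : ∀ c, 0 ≤ pvR c x := by
  induction x with
  | nil => intro c; simp [pvR]
  | cons v xs ih =>
    intro c
    simp only [pvR]
    split_ifs
    · exact le_trans (ih (c + 1)) (le_max_right _ _)
    · exact ih 0

theorem pvLead_nonneg (x : List String) : 0 ≤ pvLead x := by
  induction x with
  | nil => simp [pvLead]
  | cons v xs ih => simp only [pvLead]; split_ifs <;> omega

theorem pvR_mono (x : List String) : ∀ c d : Int, c ≤ d → pvR c x ≤ pvR d x := by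
  induction x with
  | nil => intro c d _; simp [pvR]
  | cons v xs ih =>
    intro c d h
    simp only [pvR]
    split_ifs
    · have := ih (c + 1) (d + 1) (by omega); omega
    · exact le_rfl

theorem pvFold_eq (x : List String) : ∀ b c : Int, 0 ≤ b →
    x.foldl pvStepA (b, c) = (max b (pvR c x), pvT c x) := by
  induction x with
  | nil =>
    intro b c hb
    simp only [List.foldl, pvR, pvT]
    refine Prod.ext ?_ rfl
    simp only
    omega
  | cons v xs ih =>
    intro b c hb
    simp only [List.foldl, pvStepA, pvKind_eq, pvR, pvT]
    split_ifs with h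
    · rw [ih (max b (c + 1)) (c + 1) (by omega)]
      refine Prod.ext ?_ rfl
      simp only
      omega
    · exact ih b 0 hb

theorem pvR_append (y : List String) (x : List String) : ∀ c : Int,
    pvR c (x ++ y) = max (pvR c x) (pvR (pvT c x) y) := by
  induction x with
  | nil =>
    intro c
    have := pvR_nonneg y c
    simp only [List.nil_append, pvR, pvT]
    omega
  | cons v xs ih =>
    intro c
    simp only [List.cons_append, pvR, pvT]
    split_ifs with h
    · rw [ih (c + 1)]; omega
    · exact ih 0

-- pvR c x ≤ max (pvR 0 x) (c + lead x)
theorem pvR_upper (x : List String) : ∀ c : Int, pvR c x ≤ max (pvR 0 x) (c + pvLead x) := by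
  induction x with
  | nil => intro c; simp [pvR, pvLead]
  | cons v xs ih =>
    intro c
    simp only [pvR, pvLead]
    split_ifs with h
    · have h1 := ih (c + 1)
      have h2 := pvR_mono xs 0 1 (by omega)
      have h3 := pvLead_nonneg xs
      simp only [zero_add] at *
      omega
    · have := pvR_nonneg xs (0 : Int)
      omega

-- c + lead x ≤ max c (pvR c x)
theorem pvR_lower (x : List String) : ∀ c : Int, c + pvLead x ≤ max c (pvR c x) := by
  induction x with
  | nil => intro c; simp [pvR, pvLead]
  | cons v xs ih =>
    intro c
    simp only [pvR, pvLead]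
    split_ifs with h
    · have := ih (c + 1); omega
    · omega

-- the trailing run never beats the best run (nonempty list)
theorem pvT_le (x : List String) (hx : x ≠ []) : ∀ c : Int, pvT c x ≤ max c (pvR c x) := by
  induction x with
  | nil => exact absurd rfl hx
  | cons v xs ih =>
    intro c
    simp only [pvT, pvR]
    by_cases hxs : xs = []
    · subst hxs
      split_ifs with h <;> simp [pvT, pvR]
    · split_ifs with h
      · have := ih hxs (c + 1); omega
      · have := ih hxs (0 : Int)
        have := pvR_nonneg xs (0 : Int)
        omega

theorem pvCore (cyc : List String) :
    min (max 0 (pvR 0 (cyc ++ cyc))) (cyc.length : Int)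
      = min (max (max 0 (pvR 0 cyc)) (pvT 0 cyc + pvLead cyc)) (cyc.length : Int) := by
  have hR := pvR_nonneg cyc (0 : Int)
  rw [pvR_append]
  by_cases hx : cyc = []
  · subst hx; simp [pvR, pvT, pvLead]
  · have hT := pvT_le cyc hx 0
    have hU := pvR_upper cyc (pvT 0 cyc)
    have hL := pvR_lower cyc (pvT 0 cyc)
    omega

-- ===== VERDICT (by name: the statement is the Claim_ definition above) =====
theorem max_outer_run_spec : Claim_equal_max_outer_run := by
  intro cycle _ _
  unfold Spec_max_outer_run max_outer_run max_outer_run_alt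
  simp only [pvStepA_eq.symm]
  rw [pvFold_eq _ 0 0 le_rfl, pvFold_eq _ 0 0 le_rfl]
  exact pvCore (PySem.List.slice cycle none (some (-1)))
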